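-- pv_equiv track=rewrite | github.com/Gabrielsvc/GeneticAlgorithm | ga.py | funcaodecusto
-- ===== SOURCE A (Python) =====
-- custao = 30
--
-- def funcaodecusto(populacao,individuo,matrix): # Funcaoo de Custo de cada individuo
-- 	custo = 0
-- 	for x in range(5):
-- 		if(x != 4):
-- 			custo += matrix[int(populacao[individuo][x])][int(populacao[individuo][x+1])]
-- 		for y in range(5):
-- 			if(populacao[individuo][x] == populacao[individuo][y] and x != y):
-- 				custo += custao
-- 	return custo
-- ===== SOURCE B (Python) =====
-- custao = 30
--
-- def funcaodecusto(populacao, individuo, matrix):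
--     path = [populacao[individuo][x] for x in range(5)]
--     total = 0
--     for u, v in zip(path, path[1:]):
--         total += matrix[int(u)][int(v)]
--     s = sorted(path)
--     run = 1
--     for u, v in zip(s, s[1:]):
--         if u == v:
--             total += custao * 2 * run
--             run += 1
--         else:
--             run = 1
--     return total
-- ===== Notes on version B (the rewrite author's own statement) =====
-- stated objective: alternative
-- what changed: B replaces A's 5x5 all-pairs duplicate comparison with sort-then-linear-scan: it sorts the five cities so equal cities become adjacent and tallies the penalty with a run-length counter (adding custao*2*run per extension of a run), while the route cost becomes one pass over consecutive zipped pairs.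
import Mathlib
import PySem

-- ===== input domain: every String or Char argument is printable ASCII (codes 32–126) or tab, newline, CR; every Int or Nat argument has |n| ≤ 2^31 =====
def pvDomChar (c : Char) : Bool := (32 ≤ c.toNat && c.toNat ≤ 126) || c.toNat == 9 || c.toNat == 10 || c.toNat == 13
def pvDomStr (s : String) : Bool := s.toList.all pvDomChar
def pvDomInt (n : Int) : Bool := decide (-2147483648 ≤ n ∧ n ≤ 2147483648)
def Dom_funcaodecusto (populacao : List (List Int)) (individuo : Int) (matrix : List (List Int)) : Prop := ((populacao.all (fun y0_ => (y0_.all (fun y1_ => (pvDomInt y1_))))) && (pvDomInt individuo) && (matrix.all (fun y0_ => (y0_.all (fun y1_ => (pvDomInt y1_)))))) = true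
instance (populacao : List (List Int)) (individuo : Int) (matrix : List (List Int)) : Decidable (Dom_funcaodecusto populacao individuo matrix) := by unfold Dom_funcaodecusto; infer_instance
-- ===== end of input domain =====

-- B computes the duplicate penalty by sorting the five cities and scanning runs of equal
-- values with a run-length counter, instead of A's 5×5 all-pairs comparison; objective: alternative.

-- ===== PORT A =====
def funcaodecusto (populacao : List (List Int)) (individuo : Int) (matrix : List (List Int)) : Int :=
  (PySem.List.pyRange 0 5 1).foldl (fun custo x =>
    (PySem.List.pyRange 0 5 1).foldl (fun c y =>
      if PySem.List.pyGetD (PySem.List.pyGetD populacao individuo []) x 0 =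
           PySem.List.pyGetD (PySem.List.pyGetD populacao individuo []) y 0 ∧ x ≠ y
      then c + 30 else c)
      (if x ≠ 4 then
        custo + PySem.List.pyGetD (PySem.List.pyGetD matrix
          (PySem.List.pyGetD (PySem.List.pyGetD populacao individuo []) x 0) [])
          (PySem.List.pyGetD (PySem.List.pyGetD populacao individuo []) (x + 1) 0) 0
      else custo)) 0

-- ===== PORT B =====
def funcaodecusto_alt (populacao : List (List Int)) (individuo : Int) (matrix : List (List Int)) : Int :=
  let path := (PySem.List.pyRange 0 5 1).map (fun x =>
    PySem.List.pyGetD (PySem.List.pyGetD populacao individuo []) x 0)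
  let total := (path.zip (PySem.List.slice path (some 1) none)).foldl
    (fun t p => t + PySem.List.pyGetD (PySem.List.pyGetD matrix p.1 []) p.2 0) 0
  let s := PySem.List.sorted path (fun v => v) false
  ((s.zip (PySem.List.slice s (some 1) none)).foldl
    (fun (st : Int × Int) p => if p.1 = p.2 then (st.1 + 30 * 2 * st.2, st.2 + 1) else (st.1, 1))
    (total, 1)).1

-- ===== PRECONDITION & SPEC =====
-- Pre_ excludes exactly the inputs on which the Python A raises IndexError: individuo out of
-- range for populacao, a selected row with fewer than 5 entries, or a matrix lookup out of range.
def Pre_funcaodecusto (populacao : List (List Int)) (individuo : Int) (matrix : List (List Int)) : Prop :=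
  PySem.Raise.InRange populacao.length individuo ∧
  5 ≤ (PySem.List.pyGetD populacao individuo []).length ∧
  ∀ x ∈ PySem.List.pyRange 0 4 1,
    PySem.Raise.InRange matrix.length
      (PySem.List.pyGetD (PySem.List.pyGetD populacao individuo []) x 0) ∧
    PySem.Raise.InRange
      (PySem.List.pyGetD matrix (PySem.List.pyGetD (PySem.List.pyGetD populacao individuo []) x 0) []).length
      (PySem.List.pyGetD (PySem.List.pyGetD populacao individuo []) (x + 1) 0)

instance (populacao : List (List Int)) (individuo : Int) (matrix : List (List Int)) : Decidable (Pre_funcaodecusto populacao individuo matrix) := by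
  unfold Pre_funcaodecusto; infer_instance

def pvWitness_funcaodecusto : List (List Int) × Int × List (List Int) :=
  ([[0, 1, 2, 3, 4]], 0,
   [[0, 3, 1, 2, 4], [3, 0, 5, 1, 2], [1, 5, 0, 2, 3], [2, 1, 2, 0, 1], [4, 2, 3, 1, 0]])

def Spec_funcaodecusto (populacao : List (List Int)) (individuo : Int) (matrix : List (List Int)) (out : Int) : Prop := out = funcaodecusto_alt populacao individuo matrix
instance (populacao : List (List Int)) (individuo : Int) (matrix : List (List Int)) (out : Int) : Decidable (Spec_funcaodecusto populacao individuo matrix out) := by unfold Spec_funcaodecusto; infer_instance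

-- ===== CLAIM (what is proved, stated in full; the proofs are below) =====
def Claim_equal_funcaodecusto : Prop := ∀ (populacao : List (List Int)) (individuo : Int) (matrix : List (List Int)), Dom_funcaodecusto populacao individuo matrix → Pre_funcaodecusto populacao individuo matrix → Spec_funcaodecusto populacao individuo matrix (funcaodecusto populacao individuo matrix)

-- ===== LEMMAS AND PROOFS =====

-- number of ordered duplicate pairs in l: Σ_{x∈l} (count l x - 1)
def dupP (l : List Int) : Int := (l.map (fun x => (l.count x : Int) - 1)).sum

-- the run-scan loop of B, in recursive form (prev = previous element, run = current run length)
def goRun (prev run total : Int) : List Int → Int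
  | [] => total
  | v :: vs => if prev = v then goRun v (run + 1) (total + 30 * 2 * run) vs
               else goRun v 1 total vs

theorem zip_foldl_goRun (vs : List Int) : ∀ (v run t : Int),
    (((v :: vs).zip vs).foldl
      (fun (st : Int × Int) p => if p.1 = p.2 then (st.1 + 30 * 2 * st.2, st.2 + 1) else (st.1, 1))
      (t, run)).1 = goRun v run t vs := by
  induction vs with
  | nil => intro v run t; simp [goRun]
  | cons w ws ih =>
    intro v run t
    simp only [List.zip_cons_cons, List.foldl_cons, goRun]
    by_cases h : v = w
    · simpa [h] using ih w (run + 1) (t + 30 * 2 * run)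
    · simpa [h] using ih w 1 t

theorem count_indicator (m : List Int) (v : Int) :
    (m.map (fun x => if x = v then (1 : Int) else 0)).sum = (m.count v : Int) := by
  induction m with
  | nil => simp
  | cons w ws ih =>
    simp only [List.map_cons, List.sum_cons, List.count_cons, ih]
    by_cases h : w = v
    · simp [h]; push_cast; ring
    · have h2 : ¬ v = w := fun hx => h hx.symm
      simp [h, h2]

theorem dupP_cons (v : Int) (m : List Int) :
    dupP (v :: m) = dupP m + 2 * (m.count v : Int) := by
  unfold dupP
  rw [List.map_cons, List.sum_cons]
  have hmap : (m.map (fun x => ((v :: m).count x : Int) - 1))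
      = (m.map (fun x => ((m.count x : Int) - 1) + (if x = v then (1 : Int) else 0))) := by
    apply List.map_congr_left
    intro x _
    simp only [List.count_cons]
    by_cases h : v = x
    · subst h; simp
    · have h2 : ¬ x = v := fun hx => h hx.symm
      simp [h, h2]
  rw [hmap, PySem.List.sum_map_add_int, count_indicator]
  have hvv : ((v :: m).count v : Int) = (m.count v : Int) + 1 := by simp [List.count_cons]
  rw [hvv]
  ring

theorem dupP_perm {l l' : List Int} (h : l.Perm l') : dupP l = dupP l' := by
  unfold dupP
  have hc : ∀ x, l.count x = l'.count x := fun x => h.count_eq x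
  have : l'.map (fun x => ((l'.count x : Int) - 1)) = l'.map (fun x => ((l.count x : Int) - 1)) := by
    apply List.map_congr_left; intro x _; rw [hc]
  rw [this]
  exact (h.map _).sum_eq

theorem goRun_sorted (vs : List Int) : ∀ (prev run total : Int),
    (prev :: vs).Pairwise (· ≤ ·) →
    goRun prev run total vs = total + 30 * (dupP (prev :: vs) + 2 * (vs.count prev : Int) * (run - 1)) := by
  induction vs with
  | nil =>
    intro prev run total _
    simp [goRun, dupP]
  | cons v vs' ih =>
    intro prev run total hp
    have hple : prev ≤ v := (List.pairwise_cons.mp hp).1 v (by simp)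
    have hp' : (v :: vs').Pairwise (· ≤ ·) := (List.pairwise_cons.mp hp).2
    simp only [goRun]
    by_cases h : prev = v
    · rw [if_pos h, h, ih v (run + 1) (total + 30 * 2 * run) hp']
      have h1 : dupP (v :: v :: vs') = dupP (v :: vs') + 2 * (((v :: vs').count v : Int)) :=
        dupP_cons _ _
      have h3 : ((v :: vs').count v : Int) = (vs'.count v : Int) + 1 := by
        simp [List.count_cons]
      rw [h1, h3]
      ring
    · rw [if_neg h, ih v 1 total hp']
      have hnot : (v :: vs').count prev = 0 := by
        rw [List.count_eq_zero]
        intro hmem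
        rcases List.mem_cons.mp hmem with h1 | h1
        · exact h h1
        · have := (List.pairwise_cons.mp hp').1 prev h1
          omega
      have hd : dupP (prev :: v :: vs') = dupP (v :: vs') := by
        rw [dupP_cons, hnot]; simp
      rw [hd, hnot]
      push_cast
      ring

-- 'if p(y): c += k' as a loop: the fold adds k times the number of hits.
theorem foldl_if_add_const {β : Type} (l : List β) (p : β → Prop) [DecidablePred p] (k a : Int) :
    l.foldl (fun c y => if p y then c + k else c) a
      = a + k * (l.map (fun y => if p y then (1 : Int) else 0)).sum := by
  induction l generalizing a with
  | nil => simp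
  | cons x t ih =>
    simp only [List.foldl_cons, List.map_cons, List.sum_cons, ih]
    by_cases h : p x
    · simp [h]; ring
    · simp [h]

-- ===== VERDICT (by name: the statement is the Claim_ definition above) =====
set_option maxHeartbeats 2000000 in
theorem funcaodecusto_spec : Claim_equal_funcaodecusto := by
  intro populacao individuo matrix _ hpre
  unfold Spec_funcaodecusto
  obtain ⟨h1, h2, h3⟩ := hpre
  unfold funcaodecusto funcaodecusto_alt
  generalize hg : PySem.List.pyGetD populacao individuo [] = row at h2 h3 ⊢
  obtain ⟨a, b, c, d, e, rest, hr⟩ : ∃ a b c d e rest, row = a :: b :: c :: d :: e :: rest := by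
    match row, h2 with
    | a :: b :: c :: d :: e :: rest, _ => exact ⟨a, b, c, d, e, rest, rfl⟩
  subst hr
  -- A side: outer loop body → 'custo + (route contribution + 30 * duplicate hits)'
  rw [PySem.List.foldl_congr_mem (PySem.List.pyRange 0 5 1)
      (fun custo x =>
        (PySem.List.pyRange 0 5 1).foldl (fun c' y =>
          if PySem.List.pyGetD (a :: b :: c :: d :: e :: rest) x 0 =
               PySem.List.pyGetD (a :: b :: c :: d :: e :: rest) y 0 ∧ x ≠ y
          then c' + 30 else c')
          (if x ≠ 4 then
            custo + PySem.List.pyGetD (PySem.List.pyGetD matrix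
              (PySem.List.pyGetD (a :: b :: c :: d :: e :: rest) x 0) [])
              (PySem.List.pyGetD (a :: b :: c :: d :: e :: rest) (x + 1) 0) 0
          else custo))
      (fun custo x => custo +
        ((if x ≠ 4 then
            PySem.List.pyGetD (PySem.List.pyGetD matrix
              (PySem.List.pyGetD (a :: b :: c :: d :: e :: rest) x 0) [])
              (PySem.List.pyGetD (a :: b :: c :: d :: e :: rest) (x + 1) 0) 0
          else 0) +
          30 * ((PySem.List.pyRange 0 5 1).map (fun y =>
            if PySem.List.pyGetD (a :: b :: c :: d :: e :: rest) x 0 =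
                 PySem.List.pyGetD (a :: b :: c :: d :: e :: rest) y 0 ∧ x ≠ y
            then (1 : Int) else 0)).sum))
      0
      (by
        intro acc x _
        simp only
        rw [foldl_if_add_const (p := fun y =>
          PySem.List.pyGetD (a :: b :: c :: d :: e :: rest) x 0 =
            PySem.List.pyGetD (a :: b :: c :: d :: e :: rest) y 0 ∧ x ≠ y)]
        by_cases hx : x = 4
        · simp [hx]
        · simp only [hx, if_pos, ne_eq, not_false_iff]
          ring)]
  rw [PySem.List.foldl_add]
  -- B side: evaluate path, then reduce the run scan over the sorted list to dupP
  have hpath : (PySem.List.pyRange 0 5 1).map (fun x =>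
      PySem.List.pyGetD (a :: b :: c :: d :: e :: rest) x 0) = [a, b, c, d, e] := by
    rw [show PySem.List.pyRange 0 5 1 = [0, 1, 2, 3, 4] from by decide]
    simp [pysem]
  obtain ⟨m, t, hs⟩ : ∃ m t, PySem.List.sorted [a, b, c, d, e] (fun v => v) false = m :: t := by
    rcases hsort : PySem.List.sorted [a, b, c, d, e] (fun v => v) false with _ | ⟨m, t⟩
    · have := PySem.List.length_sorted (xs := [a, b, c, d, e]) (key := fun v => v) (rev := false)
      rw [hsort] at this
      simp at this
    · exact ⟨m, t, rfl⟩
  have hpw : (m :: t).Pairwise (· ≤ ·) := by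
    have := PySem.List.sorted_pairwise (xs := [a, b, c, d, e]) (key := fun v => v)
    rw [hs] at this
    exact this
  have hdup : dupP (m :: t) = dupP [a, b, c, d, e] :=
    dupP_perm (hs ▸ PySem.List.sorted_perm (xs := [a, b, c, d, e]) (key := fun v => v) (rev := false))
  have hscan : ∀ T : Int,
      (((m :: t).zip (PySem.List.slice (m :: t) (some 1) none)).foldl
        (fun (st : Int × Int) p => if p.1 = p.2 then (st.1 + 30 * 2 * st.2, st.2 + 1) else (st.1, 1))
        (T, 1)).1 = T + 30 * dupP [a, b, c, d, e] := by
    intro T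
    rw [PySem.List.slice_from_one]
    show (((m :: t).zip t).foldl _ (T, 1)).1 = _
    rw [zip_foldl_goRun t m 1 T, goRun_sorted t m 1 T hpw, hdup]
    ring
  simp only [hpath, hs, hscan]
  rw [show PySem.List.pyRange 0 5 1 = [0, 1, 2, 3, 4] from by decide]
  simp only [PySem.List.slice_from_one]
  simp [pysem, dupP, List.count_cons]
  simp only [eq_comm]
  ring
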